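-- pv_equiv track=rewrite | github.com/k0rval4n/Respaldo-k0rval4n-IIC2233 | Tareas/T2/entrega_intermedia/utilidades_cliente.py | riesgo_abajo
-- ===== SOURCE A (Python) =====
-- def riesgo_abajo(coords: tuple, tablero: list):
--     fil_i = coords[0]
--     col_i = coords[1]
--     choco = False
--     for fil in range(fil_i + 1, len(tablero)):
--         if tablero[fil][col_i] == "P":
--             choco = True
--         if not choco and tablero[fil][col_i] == "C":
--             return True
--     return False
-- ===== SOURCE B (Python) =====
-- def riesgo_abajo(coords: tuple, tablero: list):
--     fil_i = coords[0]
--     col_i = coords[1]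
--     col = [tablero[f][col_i] for f in range(fil_i + 1, len(tablero))]
--     if "C" not in col:
--         return False
--     if "P" not in col:
--         return True
--     return col.index("C") < col.index("P")
-- ===== Notes on version B (the rewrite author's own statement) =====
-- stated objective: simpler
-- what changed: Replaces A's running 'choco' flag and per-cell branching with a build-then-compare decomposition: materialise the column below the coordinates once, then decide by membership and first-index comparison (col.index('C') < col.index('P')).
-- outside the precondition, e.g. on riesgo_abajo((0, 0), [['X'], ['C'], []]): A returns True, B raises IndexError
import Mathlib
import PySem

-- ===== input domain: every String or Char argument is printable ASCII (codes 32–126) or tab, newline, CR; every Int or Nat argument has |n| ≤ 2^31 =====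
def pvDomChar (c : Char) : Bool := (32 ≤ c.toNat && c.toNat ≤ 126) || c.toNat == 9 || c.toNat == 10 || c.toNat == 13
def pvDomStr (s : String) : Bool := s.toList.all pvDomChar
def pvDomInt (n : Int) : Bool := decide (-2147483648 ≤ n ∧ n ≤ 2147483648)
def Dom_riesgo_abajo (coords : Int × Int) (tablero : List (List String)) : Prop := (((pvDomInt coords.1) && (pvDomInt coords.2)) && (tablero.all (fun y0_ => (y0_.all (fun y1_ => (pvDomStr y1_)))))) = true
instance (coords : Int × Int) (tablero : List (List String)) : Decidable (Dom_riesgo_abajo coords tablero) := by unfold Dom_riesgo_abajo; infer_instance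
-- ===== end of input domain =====

-- B replaces A's running flag-scan by a build-then-index-compare decomposition (simpler); equal on Pre_.

-- tablero[fil][col_i] with Python index semantics (none = IndexError)
def pvCell (tablero : List (List String)) (col_i fil : Int) : Option String :=
  (PySem.List.pyGet? tablero fil).bind (fun row => PySem.List.pyGet? row col_i)

-- ===== PORT A =====
-- the for-loop with early return, as structural recursion over the row indices, carrying 'choco'
def pvLoopA (tablero : List (List String)) (col_i : Int) : List Int → Bool → Bool
  | [], _ => false
  | fil :: rest, choco =>
    let choco := if pvCell tablero col_i fil = some "P" then true else choco
    if choco = false && pvCell tablero col_i fil = some "C" then true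
    else pvLoopA tablero col_i rest choco

def riesgo_abajo (coords : Int × Int) (tablero : List (List String)) : Bool :=
  pvLoopA tablero coords.2 (PySem.List.pyRange (coords.1 + 1) (tablero.length : Int) 1) false

-- ===== PORT B =====
def riesgo_abajo_alt (coords : Int × Int) (tablero : List (List String)) : Bool :=
  let col := (PySem.List.pyRange (coords.1 + 1) (tablero.length : Int) 1).map
      (fun f => (pvCell tablero coords.2 f).getD "")
  if !col.contains "C" then false
  else if !col.contains "P" then true
  else
    match PySem.List.index? col "C", PySem.List.index? col "P" with
    | some i, some j => decide (i < j)
    | _, _ => false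

-- ===== PRECONDITION & SPEC =====
-- Pre_ excludes inputs where some cell of the scanned column is missing (a row below the
-- coordinates too short or out of range): there A may still return True by stopping at an early
-- "C" before reaching the bad row, while B's eager column build raises IndexError.
def Pre_riesgo_abajo (coords : Int × Int) (tablero : List (List String)) : Prop :=
  (tablero.length : Int) ≤ coords.1 + 1 ∨
  (-(tablero.length : Int) ≤ coords.1 + 1 ∧
    ∀ f ∈ PySem.List.pyRange (coords.1 + 1) (tablero.length : Int) 1,
      (pvCell tablero coords.2 f).isSome)

instance (coords : Int × Int) (tablero : List (List String)) : Decidable (Pre_riesgo_abajo coords tablero) := by unfold Pre_riesgo_abajo; infer_instance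

def pvWitness_riesgo_abajo : (Int × Int) × List (List String) := ((0, 0), [["X"], ["C"], ["P"]])

def Spec_riesgo_abajo (coords : Int × Int) (tablero : List (List String)) (out : Bool) : Prop := out = riesgo_abajo_alt coords tablero
instance (coords : Int × Int) (tablero : List (List String)) (out : Bool) : Decidable (Spec_riesgo_abajo coords tablero out) := by unfold Spec_riesgo_abajo; infer_instance

-- ===== CLAIM (what is proved, stated in full; the proofs are below) =====
def Claim_equal_riesgo_abajo : Prop := ∀ (coords : Int × Int) (tablero : List (List String)), Dom_riesgo_abajo coords tablero → Pre_riesgo_abajo coords tablero → Spec_riesgo_abajo coords tablero (riesgo_abajo coords tablero)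

-- ===== LEMMAS AND PROOFS =====

-- B's decision, as a function of the column contents alone
def pvAltOn (cs : List String) : Bool :=
  if !cs.contains "C" then false
  else if !cs.contains "P" then true
  else
    match PySem.List.index? cs "C", PySem.List.index? cs "P" with
    | some i, some j => decide (i < j)
    | _, _ => false

lemma pvLoopA_true (t : List (List String)) (c : Int) :
    ∀ l : List Int, pvLoopA t c l true = false := by
  intro l
  induction l with
  | nil => rfl
  | cons f rest ih =>
    simp only [pvLoopA]
    split_ifs <;> simp_all

lemma pvAltOn_cons_C (cs : List String) : pvAltOn ("C" :: cs) = true := by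
  unfold pvAltOn
  simp only [PySem.List.index?_eq_idxOf?, List.idxOf?_cons, List.contains_cons, BEq.rfl,
    Bool.true_or, Bool.not_true, if_neg (by simp : ¬ false = true)]
  by_cases hPm : ("P" : String) ∈ cs
  · obtain ⟨j, hj⟩ := Option.isSome_iff_exists.mp ((List.isSome_idxOf? ..).mpr hPm)
    simp [hj]
  · simp [hPm]

lemma pvAltOn_cons_P (cs : List String) : pvAltOn ("P" :: cs) = false := by
  unfold pvAltOn
  simp only [PySem.List.index?_eq_idxOf?, List.idxOf?_cons, List.contains_cons, BEq.rfl,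
    Bool.true_or, Bool.not_true, if_neg (by simp : ¬ false = true)]
  by_cases hCm : ("C" : String) ∈ cs
  · obtain ⟨i, hi⟩ := Option.isSome_iff_exists.mp ((List.isSome_idxOf? ..).mpr hCm)
    simp [hi]
  · simp [hCm]

lemma pvAltOn_cons_other {s : String} (hC : s ≠ "C") (hP : s ≠ "P") (cs : List String) :
    pvAltOn (s :: cs) = pvAltOn cs := by
  have h1 : (s == "C") = false := by simpa using hC
  have h2 : (s == "P") = false := by simpa using hP
  unfold pvAltOn
  simp only [PySem.List.index?_eq_idxOf?, List.idxOf?_cons, List.contains_cons, h1, h2,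
    if_neg (by simp : ¬ false = true)]
  have hC' : ¬("C" = s) := fun hh => hC hh.symm
  have hP' : ¬("P" = s) := fun hh => hP hh.symm
  rcases hc : List.idxOf? "C" cs with _ | i <;>
    rcases hp : List.idxOf? "P" cs with _ | j <;>
    simp_all [List.idxOf?_eq_none_iff]

lemma pvLoopA_eq_pvAltOn (t : List (List String)) (c : Int) :
    ∀ l : List Int, (∀ f ∈ l, (pvCell t c f).isSome) →
      pvLoopA t c l false = pvAltOn (l.map (fun f => (pvCell t c f).getD "")) := by
  intro l
  induction l with
  | nil => intro _; rfl
  | cons f rest ih =>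
    intro h
    obtain ⟨s, hs⟩ := Option.isSome_iff_exists.mp (h f (List.mem_cons_self))
    have hrest : ∀ g ∈ rest, (pvCell t c g).isSome := fun g hg => h g (List.mem_cons_of_mem _ hg)
    simp only [List.map_cons, hs, Option.getD_some]
    by_cases hC : s = "C"
    · subst hC
      rw [pvAltOn_cons_C]
      simp [pvLoopA, hs]
    · by_cases hP : s = "P"
      · subst hP
        rw [pvAltOn_cons_P]
        have : pvLoopA t c (f :: rest) false = pvLoopA t c rest true := by
          simp [pvLoopA, hs]
        rw [this, pvLoopA_true]
      · rw [pvAltOn_cons_other hC hP]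
        have : pvLoopA t c (f :: rest) false = pvLoopA t c rest false := by
          simp [pvLoopA, hs, hP, hC]
        rw [this, ih hrest]

-- ===== VERDICT (by name: the statement is the Claim_ definition above) =====
theorem riesgo_abajo_spec : Claim_equal_riesgo_abajo := by
  intro coords tablero _ hpre
  unfold Spec_riesgo_abajo riesgo_abajo riesgo_abajo_alt
  rcases hpre with h | ⟨_, h2⟩
  · rw [PySem.List.pyRange_one_eq_nil h]
    rfl
  · exact pvLoopA_eq_pvAltOn tablero coords.2 _ h2
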